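-- pv_equiv track=rewrite | github.com/LauroLn/CatBioSearch | back-end-fasta/services.py | buscar_gene_pkd1
-- ===== SOURCE A (Python) =====
-- def buscar_gene_pkd1(conteudo):
--     """
--     Procura pelo gene PKD1 em um arquivo FASTA.
--     """
--     cabecalho = ''
--     sequencias = []
--     gene_encontrado = False
--
--     for linha in conteudo:
--         linha = linha.strip()
--         if linha.startswith('>'):
--             if gene_encontrado:
--                 break
--             if 'PKD1' in linha.upper():
--                 cabecalho = linha
--                 gene_encontrado = True
--         elif gene_encontrado:
--             sequencias.append(linha)
--
--     if gene_encontrado: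
--         return {
--             'cabecalho': cabecalho,
--             'sequencia': ''.join(sequencias)
--         }
--     else:
--         return {"error": "Gene PKD1 não encontrado no arquivo"}
-- ===== SOURCE B (Python) =====
-- def buscar_gene_pkd1(conteudo):
--     """
--     Procura pelo gene PKD1 em um arquivo FASTA.
--     """
--     # Phase 1: parse into records (header, list-of-sequence-lines)
--     registros = []
--     atual = None
--     for linha in conteudo:
--         linha = linha.strip()
--         if linha.startswith('>'):
--             atual = (linha, [])
--             registros.append(atual)
--         elif atual is not None:
--             atual[1].append(linha)
--     # Phase 2: first record whose header mentions PKD1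
--     for cabecalho, linhas in registros:
--         if 'PKD1' in cabecalho.upper():
--             return {'cabecalho': cabecalho, 'sequencia': ''.join(linhas)}
--     return {"error": "Gene PKD1 não encontrado no arquivo"}
-- ===== Notes on version B (the rewrite author's own statement) =====
-- stated objective: alternative
-- what changed: Replaces the single flag-driven scan with early break by a two-phase structure: first parse all lines into (header, sequence-lines) records, then search the record list for the first header containing PKD1.
import Mathlib
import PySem

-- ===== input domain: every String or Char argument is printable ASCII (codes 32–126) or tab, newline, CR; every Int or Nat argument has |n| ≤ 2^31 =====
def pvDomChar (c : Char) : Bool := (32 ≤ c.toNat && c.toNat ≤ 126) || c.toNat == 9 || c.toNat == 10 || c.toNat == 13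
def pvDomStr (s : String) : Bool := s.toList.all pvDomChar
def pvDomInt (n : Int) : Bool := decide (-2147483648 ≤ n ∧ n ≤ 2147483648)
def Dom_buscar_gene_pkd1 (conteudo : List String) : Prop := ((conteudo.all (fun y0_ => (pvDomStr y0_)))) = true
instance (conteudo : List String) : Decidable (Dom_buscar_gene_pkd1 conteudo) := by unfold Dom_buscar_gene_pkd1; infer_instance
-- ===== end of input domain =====

-- B replaces A's single flag-driven scan (with early break) by a two-phase
-- parse-into-records-then-search structure; same asymptotic cost (alternative).

-- ===== PORT A =====
-- the for-loop of A, with the `break` modelled by returning the state unchanged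
def pkd1LoopA : List String → String → List String → Bool → String × List String × Bool
  | [], c, s, g => (c, s, g)
  | l :: rest, c, s, g =>
    let t := PySem.Str.strip l
    if PySem.Str.startswith t ">" then
      if g then (c, s, g)
      else if PySem.Str.isIn "PKD1" (PySem.Str.upper t) then pkd1LoopA rest t s true
      else pkd1LoopA rest c s g
    else if g then pkd1LoopA rest c (s ++ [t]) g
    else pkd1LoopA rest c s g

def pkd1FinishA : String × List String × Bool → List (String × String)
  | (c, s, g) =>
    if g then [("cabecalho", c), ("sequencia", PySem.Str.join "" s)]
    else [("error", "Gene PKD1 não encontrado no arquivo")]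

def buscar_gene_pkd1 (conteudo : List String) : List (String × String) :=
  pkd1FinishA (pkd1LoopA conteudo "" [] false)

-- ===== PORT B =====
-- phase 1: parse into records (header, sequence lines); acc = completed records, cur = open record
def pkd1Parse : List String → List (String × List String) → Option (String × List String) → List (String × List String)
  | [], acc, cur => acc ++ cur.toList
  | l :: rest, acc, cur =>
    let t := PySem.Str.strip l
    if PySem.Str.startswith t ">" then pkd1Parse rest (acc ++ cur.toList) (some (t, []))
    else
      match cur with
      | some (h, ls) => pkd1Parse rest acc (some (h, ls ++ [t]))
      | none => pkd1Parse rest acc none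

-- phase 2: first record whose header mentions PKD1
def pkd1Find : List (String × List String) → List (String × String)
  | [] => [("error", "Gene PKD1 não encontrado no arquivo")]
  | (h, ls) :: rest =>
    if PySem.Str.isIn "PKD1" (PySem.Str.upper h) then
      [("cabecalho", h), ("sequencia", PySem.Str.join "" ls)]
    else pkd1Find rest

def buscar_gene_pkd1_alt (conteudo : List String) : List (String × String) :=
  pkd1Find (pkd1Parse conteudo [] none)

-- ===== PRECONDITION & SPEC =====
def Spec_buscar_gene_pkd1 (conteudo : List String) (out : List (String × String)) : Prop := out = buscar_gene_pkd1_alt conteudo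
instance (conteudo : List String) (out : List (String × String)) : Decidable (Spec_buscar_gene_pkd1 conteudo out) := by unfold Spec_buscar_gene_pkd1; infer_instance

-- ===== CLAIM (what is proved, stated in full; the proofs are below) =====
def Claim_equal_buscar_gene_pkd1 : Prop := ∀ (conteudo : List String), Dom_buscar_gene_pkd1 conteudo → Spec_buscar_gene_pkd1 conteudo (buscar_gene_pkd1 conteudo)

-- ===== LEMMAS AND PROOFS =====

-- proof-side abbreviations: the header test and the PKD1 test
def pkd1Hdr (l : String) : Bool := PySem.Str.startswith (PySem.Str.strip l) ">"
def pkd1MtchH (h : String) : Bool := PySem.Str.isIn "PKD1" (PySem.Str.upper h)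

-- the sequence lines collected after a found header: stripped lines up to the next header
def pkd1Tail : List String → List String
  | [] => []
  | l :: rest =>
    let t := PySem.Str.strip l
    if PySem.Str.startswith t ">" then [] else t :: pkd1Tail rest

lemma pkd1LoopA_found (rest : List String) :
    ∀ c s, pkd1LoopA rest c s true = (c, s ++ pkd1Tail rest, true) := by
  induction rest with
  | nil => intro c s; simp [pkd1LoopA, pkd1Tail]
  | cons l rest ih =>
    intro c s
    simp only [pkd1LoopA, pkd1Tail]
    by_cases h : PySem.Str.startswith (PySem.Str.strip l) ">" = true
    · rw [if_pos h, if_pos h]; simp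
    · rw [if_neg h, if_neg h]; simp [ih]
  
lemma pkd1Parse_acc (rest : List String) :
    ∀ acc cur, pkd1Parse rest acc cur = acc ++ pkd1Parse rest [] cur := by
  induction rest with
  | nil => intro acc cur; simp [pkd1Parse]
  | cons l rest ih =>
    intro acc cur
    simp only [pkd1Parse, List.nil_append]
    by_cases h : PySem.Str.startswith (PySem.Str.strip l) ">" = true
    · rw [if_pos h, if_pos h, ih (acc ++ cur.toList), ih cur.toList, List.append_assoc]
    · rw [if_neg h, if_neg h]
      cases cur with
      | none => exact ih acc none
      | some p => cases p with | mk hh ls => exact ih acc (some (hh, ls ++ [PySem.Str.strip l]))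

lemma pkd1Parse_found (rest : List String) :
    ∀ h ls, ∃ tail, pkd1Parse rest [] (some (h, ls)) = (h, ls ++ pkd1Tail rest) :: tail := by
  induction rest with
  | nil => intro h ls; exact ⟨[], by simp [pkd1Parse, pkd1Tail]⟩
  | cons l rest ih =>
    intro h ls
    simp only [pkd1Parse, pkd1Tail, List.nil_append]
    by_cases hh : PySem.Str.startswith (PySem.Str.strip l) ">" = true
    · refine ⟨pkd1Parse rest [] (some (PySem.Str.strip l, [])), ?_⟩
      rw [if_pos hh, if_pos hh, pkd1Parse_acc rest]
      simp
    · obtain ⟨tail, ht⟩ := ih h (ls ++ [PySem.Str.strip l])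
      refine ⟨tail, ?_⟩
      rw [if_neg hh, if_neg hh, ht]
      simp

lemma pkd1Find_skip (h : String) (ls : List String) (rest : List (String × List String))
    (hm : pkd1MtchH h = false) :
    pkd1Find ((h, ls) :: rest) = pkd1Find rest := by
  have hm' : PySem.Chars.isIn ['P', 'K', 'D', '1'] (PySem.Chars.upper h.toList) = false := by
    simpa [pkd1MtchH, PySem.Str.isIn, PySem.Str.upper] using hm
  simp [pkd1Find, hm']

lemma pkd1_main (rest : List String) :
    ∀ cur : Option (String × List String),
      (∀ h ls, cur = some (h, ls) → pkd1MtchH h = false) →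
      pkd1FinishA (pkd1LoopA rest "" [] false) = pkd1Find (pkd1Parse rest [] cur) := by
  induction rest with
  | nil =>
    intro cur hcur
    cases cur with
    | none => simp [pkd1LoopA, pkd1Parse, pkd1Find, pkd1FinishA]
    | some p =>
      cases p with
      | mk h ls =>
        rw [show pkd1Parse [] [] (some (h, ls)) = [(h, ls)] by simp [pkd1Parse],
          pkd1Find_skip h ls [] (hcur h ls rfl)]
        simp [pkd1LoopA, pkd1FinishA, pkd1Find]
  | cons l rest ih =>
    intro cur hcur
    simp only [pkd1LoopA, pkd1Parse, List.nil_append]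
    by_cases hh : PySem.Str.startswith (PySem.Str.strip l) ">" = true
    · rw [if_pos hh, if_pos hh, if_neg Bool.false_ne_true,
        pkd1Parse_acc rest cur.toList]
      by_cases hm : PySem.Str.isIn "PKD1" (PySem.Str.upper (PySem.Str.strip l)) = true
      · -- the matching header: both sides produce this record
        rw [if_pos hm, pkd1LoopA_found]
        obtain ⟨tail, ht⟩ := pkd1Parse_found rest (PySem.Str.strip l) []
        rw [ht]
        have hskip : pkd1Find (cur.toList ++ ((PySem.Str.strip l, [] ++ pkd1Tail rest) :: tail))
            = pkd1Find ((PySem.Str.strip l, [] ++ pkd1Tail rest) :: tail) := by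
          cases cur with
          | none => simp
          | some p =>
            cases p with
            | mk h ls => simpa using pkd1Find_skip h ls _ (hcur h ls rfl)
        rw [hskip]
        have hm' : PySem.Chars.isIn ['P', 'K', 'D', '1'] (PySem.Chars.upper (PySem.Chars.strip l.toList)) = true := by
          simpa [PySem.Str.isIn, PySem.Str.upper, PySem.Str.strip] using hm
        simp [pkd1Find, pkd1FinishA, hm']
      · -- a non-matching header: the open record is replaced by a non-matching one
        rw [if_neg hm,
          ih (some (PySem.Str.strip l, []))
            (by intro h ls he; cases he; simpa [pkd1MtchH] using hm)]
        cases cur with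
        | none => simp
        | some p =>
          cases p with
          | mk h ls =>
            rw [show ((some (h, ls)).toList : List (String × List String)) = [(h, ls)] from rfl,
              List.singleton_append, pkd1Find_skip h ls _ (hcur h ls rfl)]
    · -- a sequence line: appended (or dropped) on both sides
      rw [if_neg hh, if_neg hh, if_neg Bool.false_ne_true]
      cases cur with
      | none => exact ih none (by intro h ls he; cases he)
      | some p =>
        cases p with
        | mk h ls =>
          exact ih (some (h, ls ++ [PySem.Str.strip l]))
            (by intro h' ls' he; cases he; exact hcur h ls rfl)

-- ===== VERDICT (by name: the statement is the Claim_ definition above) =====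
theorem buscar_gene_pkd1_spec : Claim_equal_buscar_gene_pkd1 := by
  intro conteudo _
  show buscar_gene_pkd1 conteudo = buscar_gene_pkd1_alt conteudo
  exact pkd1_main conteudo none (by intro h ls he; cases he)
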